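-- pv_equiv track=rewrite | github.com/Leeishere/Consumer_Habits | utils/PlotClass.py | _get_max_num_plots_on_a_row
-- ===== SOURCE A (Python) =====
-- def _get_max_num_plots_on_a_row(
--                                 axis_counts_by_size):
--     """
--     this is used inside greedy_plot_placemen() with _get_all_satisfying_combinations()
--     takes output[0] from _bar_count() as input, but in use, the output[0] is mutated in between
--     #it returns a value based on available plots -> (lowest lenghts accumulate while <= len row and > len row not included) not including 0
--     where axis counts by size are (index+1)=axis_width in columns it consumes
--     num_columns_per_row is self explanitory
--     """
--     axis_map=axis_counts_by_size.copy()
--     plot_counter=0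
--     column_widths_remainding=len(axis_map)
--     pointer=0
--     while (column_widths_remainding>0) and (pointer < len(axis_map)):
--         # if there are plot(s) that size and room for them
--         if axis_map[pointer]>0 and ((column_widths_remainding-(pointer+1))>=0):
--             axis_map[pointer]-=1
--             plot_counter+=1
--             column_widths_remainding-=(pointer+1)
--             continue
--         # plots from this point and forward are too big, so break
--         elif ((column_widths_remainding-(pointer+1))<0):
--             break
--         # there are no plots at this size
--         else:
--             pointer+=1
--     return plot_counter
-- ===== SOURCE B (Python) =====
-- def _get_max_num_plots_on_a_row(axis_counts_by_size):
--     # Single pass per width: take min(count, remaining // width) plots at once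
--     # instead of A's one-plot-at-a-time while/pointer loop.
--     remaining = len(axis_counts_by_size)
--     count = 0
--     for i, n in enumerate(axis_counts_by_size):
--         width = i + 1
--         if remaining < width:
--             break
--         if n > 0:
--             take = min(n, remaining // width)
--             count += take
--             remaining -= take * width
--     return count
-- ===== Notes on version B (the rewrite author's own statement) =====
-- stated objective: simpler
-- what changed: Replaces A's one-plot-at-a-time while loop with mutable list, pointer and continue/break control flow by a single for-loop over widths that takes min(n, remaining // width) plots per width in one closed-form step.
import Mathlib
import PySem

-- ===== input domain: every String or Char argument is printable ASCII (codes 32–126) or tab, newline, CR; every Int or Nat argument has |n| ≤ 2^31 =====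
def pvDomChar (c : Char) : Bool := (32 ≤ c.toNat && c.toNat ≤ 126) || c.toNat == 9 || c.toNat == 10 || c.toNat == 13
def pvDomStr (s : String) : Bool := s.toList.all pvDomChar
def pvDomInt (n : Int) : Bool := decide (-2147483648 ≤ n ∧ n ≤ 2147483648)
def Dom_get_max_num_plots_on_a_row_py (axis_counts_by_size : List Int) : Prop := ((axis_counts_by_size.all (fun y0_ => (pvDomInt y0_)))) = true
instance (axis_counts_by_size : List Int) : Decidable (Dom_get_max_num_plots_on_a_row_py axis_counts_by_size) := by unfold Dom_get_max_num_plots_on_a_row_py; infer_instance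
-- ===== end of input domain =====

-- B replaces A's one-plot-at-a-time while/pointer loop by a single for-loop over widths
-- taking min(n, remaining // width) plots per width at once (objective: simpler).

-- ===== PORT A =====
-- A's while loop; state (axis_map, plot_counter, column_widths_remainding, pointer).
-- pointer is a Nat (it starts at 0 and is only incremented); axis_map[pointer] is read
-- with getD, exact since the loop guard ensures pointer < axis_map.length.
def pvLoopA (axis_map : List Int) (plot_counter : Int)
    (column_widths_remainding : Int) (pointer : Nat) : Int :=
  if h : column_widths_remainding > 0 ∧ pointer < axis_map.length then
    if axis_map.getD pointer 0 > 0 ∧ column_widths_remainding - ((pointer : Int) + 1) ≥ 0 then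
      pvLoopA (axis_map.set pointer (axis_map.getD pointer 0 - 1)) (plot_counter + 1)
        (column_widths_remainding - ((pointer : Int) + 1)) pointer
    else if column_widths_remainding - ((pointer : Int) + 1) < 0 then
      plot_counter
    else
      pvLoopA axis_map plot_counter column_widths_remainding (pointer + 1)
  else plot_counter
termination_by (column_widths_remainding.toNat, axis_map.length - pointer)
decreasing_by
  · apply Prod.Lex.left
    omega
  · apply Prod.Lex.right
    omega

def get_max_num_plots_on_a_row_py (axis_counts_by_size : List Int) : Int :=
  pvLoopA axis_counts_by_size 0 (axis_counts_by_size.length : Int) 0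

-- ===== PORT B =====
-- B's for-loop over enumerate(axis_counts_by_size): i is the index, n the count at
-- width i+1 (the `width` local is written out as (i:Int)+1).
def pvLoopB (xs : List Int) (i : Nat) (remaining count : Int) : Int :=
  match xs with
  | [] => count
  | n :: rest =>
    if remaining < (i : Int) + 1 then count
    else if n > 0 then
      pvLoopB rest (i + 1)
        (remaining - min n (PySem.Int.floordiv remaining ((i : Int) + 1)) * ((i : Int) + 1))
        (count + min n (PySem.Int.floordiv remaining ((i : Int) + 1)))
    else pvLoopB rest (i + 1) remaining count

def get_max_num_plots_on_a_row_py_alt (axis_counts_by_size : List Int) : Int :=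
  pvLoopB axis_counts_by_size 0 (axis_counts_by_size.length : Int) 0

-- ===== PRECONDITION & SPEC =====
def Spec_get_max_num_plots_on_a_row_py (axis_counts_by_size : List Int) (out : Int) : Prop := out = get_max_num_plots_on_a_row_py_alt axis_counts_by_size
instance (axis_counts_by_size : List Int) (out : Int) : Decidable (Spec_get_max_num_plots_on_a_row_py axis_counts_by_size out) := by unfold Spec_get_max_num_plots_on_a_row_py; infer_instance

-- ===== CLAIM (what is proved, stated in full; the proofs are below) =====
def Claim_equal_get_max_num_plots_on_a_row_py : Prop := ∀ (axis_counts_by_size : List Int), Dom_get_max_num_plots_on_a_row_py axis_counts_by_size → Spec_get_max_num_plots_on_a_row_py axis_counts_by_size (get_max_num_plots_on_a_row_py axis_counts_by_size)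

-- ===== LEMMAS AND PROOFS =====

-- B returns count immediately once remaining < i + 1 (every later width is larger).
theorem pvLoopB_dead (xs : List Int) (i : Nat) (remaining count : Int)
    (h : remaining < (i : Int) + 1) : pvLoopB xs i remaining count = count := by
  cases xs with
  | nil => rfl
  | cons n rest =>
    rw [pvLoopB, if_pos h]

-- Peeling one plot of width i+1 on the B side.
theorem pvLoopB_peel (n : Int) (rest : List Int) (i : Nat) (r c : Int)
    (hn : 0 < n) (hr : (i : Int) + 1 ≤ r) :
    pvLoopB (n :: rest) i r c
      = pvLoopB ((n - 1) :: rest) i (r - ((i : Int) + 1)) (c + 1) := by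
  have hwpos : (0 : Int) < (i : Int) + 1 := by positivity
  have hge1 : 1 ≤ PySem.Int.floordiv r ((i : Int) + 1) :=
    (PySem.Int.le_floordiv_iff_mul_le hwpos).2 (by linarith)
  have hql : PySem.Int.floordiv r ((i : Int) + 1) * ((i : Int) + 1) ≤ r :=
    (PySem.Int.le_floordiv_iff_mul_le hwpos).1 le_rfl
  have hqu : r < (PySem.Int.floordiv r ((i : Int) + 1) + 1) * ((i : Int) + 1) :=
    (PySem.Int.floordiv_lt_iff_lt_mul hwpos).1 (by omega)
  by_cases hsmall : r - ((i : Int) + 1) < (i : Int) + 1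
  · -- only one plot of this width fits: both sides finish with count c + 1
    have hdiv1 : PySem.Int.floordiv r ((i : Int) + 1) = 1 :=
      (PySem.Int.floordiv_eq_iff_of_pos hwpos).2 ⟨by linarith, by linarith⟩
    rw [pvLoopB, if_neg (by omega), if_pos hn, hdiv1]
    have hmin : min n 1 = 1 := by omega
    rw [hmin]
    rw [pvLoopB_dead ((n - 1) :: rest) i (r - ((i : Int) + 1)) (c + 1) hsmall]
    rw [pvLoopB_dead rest (i + 1) (r - 1 * ((i : Int) + 1)) (c + 1) (by push_cast; omega)]
  · -- at least two widths' worth of room remains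
    have hdiv : PySem.Int.floordiv (r - ((i : Int) + 1)) ((i : Int) + 1)
        = PySem.Int.floordiv r ((i : Int) + 1) - 1 :=
      (PySem.Int.floordiv_eq_iff_of_pos hwpos).2 ⟨by linarith, by linarith⟩
    by_cases h1 : n = 1
    · subst h1
      rw [pvLoopB, if_neg (by omega), if_pos hn]
      have hmin : min (1 : Int) (PySem.Int.floordiv r ((i : Int) + 1)) = 1 := by omega
      rw [hmin]
      conv_rhs => rw [pvLoopB]
      rw [if_neg (by omega : ¬ r - ((i : Int) + 1) < (i : Int) + 1),
          if_neg (by omega : ¬ (1 : Int) - 1 > 0), one_mul]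
    · -- n ≥ 2: the take on the right is exactly one smaller
      rw [pvLoopB, if_neg (by omega), if_pos hn]
      conv_rhs => rw [pvLoopB]
      rw [if_neg (by omega : ¬ r - ((i : Int) + 1) < (i : Int) + 1),
          if_pos (by omega : n - 1 > 0), hdiv]
      have hmin : min (n - 1) (PySem.Int.floordiv r ((i : Int) + 1) - 1)
          = min n (PySem.Int.floordiv r ((i : Int) + 1)) - 1 := by omega
      rw [hmin]
      congr 1
      · ring
      · ring

-- dropping at the pointer after setting the pointed element
theorem pv_drop_set (xs : List Int) (p : Nat) (v : Int) (hp : p < xs.length) :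
    (xs.set p v).drop p = v :: xs.drop (p + 1) := by
  have hp' : p < (xs.set p v).length := by simpa using hp
  rw [List.drop_eq_getElem_cons hp']
  rw [List.getElem_set_self]
  congr 1
  exact List.drop_set_of_lt (by omega)

theorem pv_drop_cons (xs : List Int) (p : Nat) (hp : p < xs.length) :
    xs.drop p = xs.getD p 0 :: xs.drop (p + 1) := by
  rw [List.drop_eq_getElem_cons hp, List.getD_eq_getElem _ _ hp]

-- Main invariant: A's loop from state (xs, c, r, p) equals B's loop on the suffix from p.
theorem pvLoop_agree (xs : List Int) (c r : Int) (p : Nat) :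
    pvLoopA xs c r p = pvLoopB (xs.drop p) p r c := by
  rw [pvLoopA]
  split
  · rename_i h
    obtain ⟨hr, hp⟩ := h
    split
    · rename_i htake
      obtain ⟨hn, hroom⟩ := htake
      rw [pvLoop_agree (xs.set p (xs.getD p 0 - 1)) (c + 1) (r - ((p : Int) + 1)) p]
      rw [pv_drop_set xs p _ hp]
      rw [pv_drop_cons xs p hp]
      rw [pvLoopB_peel (xs.getD p 0) (xs.drop (p + 1)) p r c hn (by omega)]
    · split
      · -- break: remaining < width
        rename_i hbreak
        rw [pv_drop_cons xs p hp]
        rw [pvLoopB_dead _ p r c (by omega)]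
      · -- skip: no plot of this size, but room remains
        rename_i hnot hbig
        rw [pvLoop_agree xs c r (p + 1)]
        rw [pv_drop_cons xs p hp]
        rw [pvLoopB, if_neg (by omega : ¬ r < (p : Int) + 1),
            if_neg (by
              intro hc
              exact hnot ⟨hc, by omega⟩)]
  · rename_i h
    rw [not_and_or] at h
    rcases h with hr | hp
    · rw [pvLoopB_dead _ p r c (by omega)]
    · rw [List.drop_eq_nil_of_le (by omega)]
      rfl
termination_by (r.toNat, xs.length - p)
decreasing_by
  all_goals first
    | (apply Prod.Lex.left; omega)
    | (apply Prod.Lex.right; omega)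

-- ===== VERDICT (by name: the statement is the Claim_ definition above) =====
theorem get_max_num_plots_on_a_row_py_spec : Claim_equal_get_max_num_plots_on_a_row_py := by
  intro xs _
  unfold Spec_get_max_num_plots_on_a_row_py get_max_num_plots_on_a_row_py get_max_num_plots_on_a_row_py_alt
  simpa using pvLoop_agree xs 0 (xs.length : Int) 0
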